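-- pv_equiv track=rewrite | github.com/RAYEESZAHOOR/LeetCode | GFG/max-diff.py | findMaxDiff
-- ===== SOURCE A (Python) =====
-- def findMaxDiff(arr):
--     n = len(arr)
--     if n == 0:
--         return 0
--
--     # Initialize left and right smaller arrays
--     ls = [0] * n
--     rs = [0] * n
--
--     # Stack to find left smaller
--     stack = []
--     for i in range(n):
--         while stack and stack[-1] >= arr[i]:
--             stack.pop()
--         ls[i] = stack[-1] if stack else 0
--         stack.append(arr[i])
--
--     # Clear the stack for right smaller processing
--     stack = []
--     for i in range(n-1, -1, -1):
--         while stack and stack[-1] >= arr[i]: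
--             stack.pop()
--         rs[i] = stack[-1] if stack else 0
--         stack.append(arr[i])
--
--     # Calculate the maximum absolute difference
--     max_diff = 0
--     for i in range(n):
--         max_diff = max(max_diff, abs(ls[i] - rs[i]))
--
--     return max_diff
-- ===== SOURCE B (Python) =====
-- def findMaxDiff(arr):
--     # Direct directional scans per index instead of monotonic stacks.
--     n = len(arr)
--     best = 0
--     for i in range(n):
--         ls = 0
--         for j in range(i - 1, -1, -1):
--             if arr[j] < arr[i]:
--                 ls = arr[j]
--                 break
--         rs = 0
--         for j in range(i + 1, n):
--             if arr[j] < arr[i]: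
--                 rs = arr[j]
--                 break
--         best = max(best, abs(ls - rs))
--     return best
-- ===== Notes on version B (the rewrite author's own statement) =====
-- stated objective: simpler
-- what changed: Replaces the two monotonic-stack passes plus auxiliary ls/rs arrays with one loop that, for each index, scans left and right for the nearest strictly smaller element directly.
import Mathlib
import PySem

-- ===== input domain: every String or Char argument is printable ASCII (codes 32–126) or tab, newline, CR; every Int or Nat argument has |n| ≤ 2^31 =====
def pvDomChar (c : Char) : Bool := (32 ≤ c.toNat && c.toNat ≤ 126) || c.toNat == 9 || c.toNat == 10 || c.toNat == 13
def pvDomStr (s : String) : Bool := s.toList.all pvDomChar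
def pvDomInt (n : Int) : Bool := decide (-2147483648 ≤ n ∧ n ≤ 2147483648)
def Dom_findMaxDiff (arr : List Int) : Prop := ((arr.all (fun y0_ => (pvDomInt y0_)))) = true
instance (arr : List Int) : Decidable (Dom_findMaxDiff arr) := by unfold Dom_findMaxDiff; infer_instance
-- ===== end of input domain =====

-- ===== PORT A =====
-- A builds nearest-smaller-left/right arrays with two monotonic-stack passes; B scans
-- left and right from each index directly (simpler, no stacks; return value only).

-- pop the stack (head = top) while its top is >= v  (the inner `while` loop of A)
def popGE : List Int → Int → List Int
  | [], _ => []
  | t :: r, v => if t ≥ v then popGE r v else t :: r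

-- one step of A's stack loop: pop, record stack[-1] (or 0), push arr[i]
def stepA (s : List Int × List Int) (x : Int) : List Int × List Int :=
  let st := popGE s.1 x
  (x :: st, s.2 ++ [st.headD 0])

def findMaxDiff (arr : List Int) : Int :=
  let n := arr.length
  if n == 0 then 0
  else
    let ls := (arr.foldl stepA ([], [])).2
    let rs := (arr.reverse.foldl stepA ([], [])).2.reverse
    (ls.zip rs).foldl (fun m lr => max m |lr.1 - lr.2|) 0

-- ===== PORT B =====
-- first element < v in the list (scan order), else 0
def firstLt : List Int → Int → Int
  | [], _ => 0
  | y :: t, v => if y < v then y else firstLt t v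

-- lrev = elements left of the cursor, nearest first; rest = cursor onward
def goB (lrev rest : List Int) (best : Int) : Int :=
  match rest with
  | [] => best
  | x :: r => goB (x :: lrev) r (max best |firstLt lrev x - firstLt r x|)

def findMaxDiff_alt (arr : List Int) : Int := goB [] arr 0

-- ===== PRECONDITION & SPEC =====
def Spec_findMaxDiff (arr : List Int) (out : Int) : Prop := out = findMaxDiff_alt arr
instance (arr : List Int) (out : Int) : Decidable (Spec_findMaxDiff arr out) := by unfold Spec_findMaxDiff; infer_instance

-- ===== CLAIM (what is proved, stated in full; the proofs are below) =====
def Claim_equal_findMaxDiff : Prop := ∀ (arr : List Int), Dom_findMaxDiff arr → Spec_findMaxDiff arr (findMaxDiff arr)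

-- ===== LEMMAS AND PROOFS =====

-- ===== VERDICT (by name: the statement is the Claim_ definition above) =====
def stackOf (p : List Int) : List Int := p.foldl (fun st x => x :: popGE st x) []

def lsSeq : List Int → List Int → List Int
  | _, [] => []
  | p, x :: r => firstLt p.reverse x :: lsSeq (p ++ [x]) r

def rsSeqP : List Int → List Int → List Int
  | [], _ => []
  | x :: r, p => firstLt (r ++ p.reverse) x :: rsSeqP r p

theorem headD_popGE (st : List Int) (v : Int) : (popGE st v).headD 0 = firstLt st v := by
  induction st with
  | nil => rfl
  | cons t r ih =>
      simp only [popGE, firstLt]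
      by_cases h : t ≥ v
      · rw [if_pos h, if_neg (by omega), ih]
      · rw [if_neg h, if_pos (by omega)]; rfl

theorem firstLt_popGE (st : List Int) (a v : Int) (h : v ≤ a) :
    firstLt (popGE st a) v = firstLt st v := by
  induction st with
  | nil => rfl
  | cons t r ih =>
      show firstLt (if t ≥ a then popGE r a else t :: r) v = _
      by_cases ht : t ≥ a
      · rw [if_pos ht, ih]
        show firstLt r v = if t < v then t else firstLt r v
        rw [if_neg (by omega)]
      · rw [if_neg ht]

theorem stackOf_append_one (p : List Int) (a : Int) :
    stackOf (p ++ [a]) = a :: popGE (stackOf p) a := by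
  simp [stackOf, List.foldl_append]

theorem firstLt_stackOf (p : List Int) (v : Int) :
    firstLt (stackOf p) v = firstLt p.reverse v := by
  induction p using List.reverseRecOn generalizing v with
  | nil => rfl
  | append_singleton q a ih =>
      rw [stackOf_append_one, List.reverse_append]
      simp only [firstLt, List.reverse_cons, List.reverse_nil, List.nil_append,
        List.cons_append, List.nil_append]
      by_cases h : a < v
      · rw [if_pos h, if_pos h]
      · rw [if_neg h, if_neg h, firstLt_popGE _ _ _ (by omega), ih]

theorem foldl_stepA (rest : List Int) (p acc : List Int) :
    rest.foldl stepA (stackOf p, acc) = (stackOf (p ++ rest), acc ++ lsSeq p rest) := by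
  induction rest generalizing p acc with
  | nil => simp [lsSeq]
  | cons x r ih =>
      simp only [List.foldl_cons, stepA]
      have hst : x :: popGE (stackOf p) x = stackOf (p ++ [x]) := (stackOf_append_one p x).symm
      have hv : (popGE (stackOf p) x).headD 0 = firstLt p.reverse x := by
        rw [headD_popGE, firstLt_stackOf]
      rw [hst, hv, ih (p ++ [x]) (acc ++ [firstLt p.reverse x])]
      simp [lsSeq]

theorem lsSeq_append_one (l : List Int) (p : List Int) (x : Int) :
    lsSeq p (l ++ [x]) = lsSeq p l ++ [firstLt (p ++ l).reverse x] := by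
  induction l generalizing p with
  | nil => simp [lsSeq]
  | cons y t ih =>
      simp only [List.cons_append, lsSeq, ih (p ++ [y])]
      simp

theorem lsSeq_reverse (l : List Int) (p : List Int) :
    lsSeq p l.reverse = (rsSeqP l p).reverse := by
  induction l generalizing p with
  | nil => rfl
  | cons x r ih =>
      rw [List.reverse_cons, lsSeq_append_one, ih]
      simp [rsSeqP]

theorem zip_fold_goB (rest : List Int) (p : List Int) (best : Int) :
    ((lsSeq p rest).zip (rsSeqP rest [])).foldl (fun m lr => max m |lr.1 - lr.2|) best
      = goB p.reverse rest best := by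
  induction rest generalizing p best with
  | nil => rfl
  | cons x r ih =>
      simp only [lsSeq, rsSeqP, List.reverse_nil, List.append_nil, List.zip_cons_cons,
        List.foldl_cons, goB]
      rw [show x :: p.reverse = (p ++ [x]).reverse by simp, ih (p ++ [x])]

theorem findMaxDiff_spec : Claim_equal_findMaxDiff := by
  unfold Claim_equal_findMaxDiff Spec_findMaxDiff
  intro arr _
  cases arr with
  | nil => rfl
  | cons a t =>
      show findMaxDiff (a :: t) = findMaxDiff_alt (a :: t)
      unfold findMaxDiff findMaxDiff_alt
      rw [if_neg (by simp)]
      have h1 : ((a :: t).foldl stepA ([], [])).2 = lsSeq [] (a :: t) := by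
        rw [show (([] : List Int), ([] : List Int)) = (stackOf [], []) from rfl,
          foldl_stepA (a :: t) [] []]
        show ([] : List Int) ++ lsSeq [] (a :: t) = _
        rw [List.nil_append]
      have h2 : ((a :: t).reverse.foldl stepA ([], [])).2.reverse = rsSeqP (a :: t) [] := by
        rw [show (([] : List Int), ([] : List Int)) = (stackOf [], []) from rfl,
          foldl_stepA (a :: t).reverse [] []]
        show (([] : List Int) ++ lsSeq [] (a :: t).reverse).reverse = _
        rw [List.nil_append, lsSeq_reverse, List.reverse_reverse]
      rw [h1, h2, zip_fold_goB (a :: t) []]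
      rfl
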